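-- pv_equiv track=rewrite | github.com/JIEUNJJING/Programmers_Python | 프로그래머스/1/135808. 과일 장수/과일 장수.py | solution
-- ===== SOURCE A (Python) =====
-- def solution(k, m, score):
--     answer = 0
--
--     score.sort(reverse=True) # 사과 점수를 내림차순으로 정렬하여 가장 높은 점수부터 처리
--     i = 0
--     while (i + m <= len(score)): # 현재 i에 m을 더했을 때, score길이를 넘지 않는다면 (상자를 만들 수 있을 만큼의 사과가 남아있음을 의미)
--         box = score[i : i + m]
--         answer += min(box) * len(box) # 상자에 담긴 사과의 최소 점수 * 상자의 크기(m)
--         i += m # 다음 상자를 만들기 위해 인덱스를 m만큼 더해줌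
--
--     return answer
-- ===== SOURCE B (Python) =====
-- def solution(k, m, score):
--     # Frequency-count approach: no per-element scan of boxes. Build a value->count
--     # map, walk the distinct values in descending order keeping a cumulative
--     # position, and count arithmetically (via floor division) how many box-minimum
--     # positions fall inside each run of equal values.
--     # NOTE: unlike A, B does not sort `score` in place; equivalence is about the
--     # return value only.
--     counts = {}
--     for v in score:
--         counts[v] = counts.get(v, 0) + 1
--     full = len(score) // m * m
--     answer = 0
--     pos = 0
--     for v in sorted(counts, reverse=True):
--         nxt = pos + counts[v]
--         answer += v * (min(nxt, full) // m - pos // m)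
--         pos = nxt
--     return m * answer
-- ===== Notes on version B (the rewrite author's own statement) =====
-- stated objective: alternative
-- what changed: Instead of sorting the whole list and scanning every box with slice+min(), B builds a value->count map in one pass, sorts only the distinct values descending, and walks the runs with a cumulative position, counting the box-minimum positions inside each run arithmetically with floor division; B does not mutate `score` (A sorts it in place).
import Mathlib
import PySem

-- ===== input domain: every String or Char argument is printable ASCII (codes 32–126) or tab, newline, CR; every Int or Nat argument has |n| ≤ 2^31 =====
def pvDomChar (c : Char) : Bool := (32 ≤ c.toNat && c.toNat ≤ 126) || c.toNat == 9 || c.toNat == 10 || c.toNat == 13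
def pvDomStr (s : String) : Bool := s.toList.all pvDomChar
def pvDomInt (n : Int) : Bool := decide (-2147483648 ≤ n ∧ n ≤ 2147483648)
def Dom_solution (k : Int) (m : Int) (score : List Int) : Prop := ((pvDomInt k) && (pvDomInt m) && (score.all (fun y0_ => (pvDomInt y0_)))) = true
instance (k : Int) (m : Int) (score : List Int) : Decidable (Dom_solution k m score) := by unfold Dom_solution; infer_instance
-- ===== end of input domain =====

-- B replaces A's sort + per-box slice + min() scan by a frequency map walked over the distinct
-- values in descending order, counting the box-minimum positions inside each run of equal values
-- arithmetically with floor division. NOTE: A sorts `score` in place and B does not; the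
-- equivalence proved here is about the RETURN value (the Lean ports take the list by value).

-- ===== PORT A =====
-- the while-loop of A: i steps by m while i + m <= len(score); fuel bounds the iteration count
def solutionLoop (s : List Int) (m : Int) : Int → Int → Nat → Int
  | _, answer, 0 => answer
  | i, answer, fuel + 1 =>
    if i + m ≤ (s.length : Int) then
      let box := PySem.List.slice s (some i) (some (i + m))
      solutionLoop s m (i + m)
        (answer + ((PySem.List.min? box (fun x => x)).getD 0) * (box.length : Int)) fuel
    else answer

def solution (k : Int) (m : Int) (score : List Int) : Int :=
  let s := PySem.List.sorted score (fun x => x) true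
  solutionLoop s m 0 0 (s.length + 1)

-- ===== PORT B =====
def solution_alt (k : Int) (m : Int) (score : List Int) : Int :=
  let counts : PySem.Dict Int Int :=
    score.foldl (fun d v => d.insert v (d.getD v 0 + 1)) PySem.Dict.empty
  let full : Int := PySem.Int.floordiv (PySem.List.len score) m * m
  let r :=
    (PySem.List.sorted counts.keys (fun x => x) true).foldl
      (fun (p : Int × Int) v =>
        let nxt := p.2 + counts.getD v 0
        (p.1 + v * (PySem.Int.floordiv (min nxt full) m - PySem.Int.floordiv p.2 m), nxt))
      (0, 0)
  m * r.1

-- ===== PRECONDITION & SPEC =====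
-- Pre_ excludes m ≤ 0, on which Python A never returns: m = 0 reaches min([]) (ValueError)
-- and for m < 0 the loop always reaches an empty slice and raises ValueError as well.
def Pre_solution (k : Int) (m : Int) (score : List Int) : Prop := 1 ≤ m
instance (k : Int) (m : Int) (score : List Int) : Decidable (Pre_solution k m score) := by
  unfold Pre_solution; infer_instance
def pvWitness_solution : Int × Int × List Int := (4, 3, [1, 2, 3, 1, 2])

def Spec_solution (k : Int) (m : Int) (score : List Int) (out : Int) : Prop := out = solution_alt k m score
instance (k : Int) (m : Int) (score : List Int) (out : Int) : Decidable (Spec_solution k m score out) := by unfold Spec_solution; infer_instance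

-- ===== CLAIM (what is proved, stated in full; the proofs are below) =====
def Claim_equal_solution : Prop := ∀ (k : Int) (m : Int) (score : List Int), Dom_solution k m score → Pre_solution k m score → Spec_solution k m score (solution k m score)

-- ===== LEMMAS AND PROOFS =====

-- range(a, b, s) with positive step s is empty when b ≤ a
lemma pyRange_pos_eq_nil (a b : Int) {s : Int} (hs : 0 < s) (h : b ≤ a) :
    PySem.List.pyRange a b s = [] := by
  rw [PySem.List.pyRange_of_pos a b hs]
  simp [show ¬ a < b by omega]

-- range(a, b, s) with positive step s and a < b starts at a
lemma pyRange_pos_cons (a b : Int) {s : Int} (hs : 0 < s) (h : a < b) :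
    PySem.List.pyRange a b s = a :: PySem.List.pyRange (a + s) b s := by
  rw [PySem.List.pyRange_of_pos a b hs, PySem.List.pyRange_of_pos (a + s) b hs]
  have hq1 : 1 ≤ (b - a + s - 1) / s := by
    rw [Int.le_ediv_iff_mul_le hs]; omega
  by_cases h2 : a + s < b
  · have hsub : (b - (a + s) + s - 1) / s = (b - a + s - 1) / s - 1 := by
      have he : b - a + s - 1 = (b - (a + s) + s - 1) + 1 * s := by ring
      rw [he, Int.add_mul_ediv_right _ _ (by omega : s ≠ 0)]; ring
    rw [if_pos h, if_pos h2, hsub]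
    have hN : ((b - a + s - 1) / s).toNat = ((b - a + s - 1) / s - 1).toNat + 1 := by omega
    rw [hN, List.range_succ_eq_map, List.map_cons, List.map_map]
    refine congrArg₂ _ (by ring) (List.map_congr_left ?_)
    intro x _
    simp only [Function.comp_apply]
    push_cast; ring
  · have hq2 : (b - a + s - 1) / s < 2 := by
      rw [Int.ediv_lt_iff_lt_mul hs]; omega
    rw [if_pos h, if_neg h2, show (b - a + s - 1) / s = 1 by omega]
    simp

-- the running-min fold of a descending-sorted list is its last element
lemma foldl_min_desc : ∀ (l : List Int) (x : Int),
    (x :: l).Pairwise (fun a b => b ≤ a) →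
    l.foldl min x = (x :: l).getLast (by simp) := by
  intro l
  induction l with
  | nil => intro x _; simp
  | cons y t ih =>
      intro x hp
      have hyx : y ≤ x := (List.pairwise_cons.1 hp).1 y (by simp)
      have hp' : (y :: t).Pairwise (fun a b => b ≤ a) := (List.pairwise_cons.1 hp).2
      have hstep : List.foldl min x (y :: t) = List.foldl min y t := by
        simp [min_eq_right hyx]
      rw [hstep, ih y hp']
      simp [List.getLast_cons]

-- min() of a nonempty descending-sorted list is its last element
lemma min_desc_getLast (l : List Int) (h : l ≠ []) (hp : l.Pairwise (fun a b => b ≤ a)) :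
    (PySem.List.min? l (fun x => x)).getD 0 = l.getLast h := by
  obtain ⟨x, t, rfl⟩ := List.exists_cons_of_ne_nil h
  rw [PySem.List.min?_id_cons, Option.getD_some]
  exact foldl_min_desc t x hp

-- the loop invariant: from a multiple i of m, A's loop adds m times the sum of the
-- boundary elements s[i+m-1], s[i+2m-1], … of the descending-sorted list s
lemma solutionLoop_eq (s : List Int) (m : Int) (hm : 1 ≤ m)
    (hs : s.Pairwise (fun a b => b ≤ a)) :
    ∀ (fuel : Nat) (i answer : Int), 0 ≤ i → m ∣ i → (s.length : Int) - i < fuel →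
      solutionLoop s m i answer fuel
        = answer + m * ((PySem.List.pyRange (i + m - 1) (PySem.Int.floordiv (s.length : Int) m * m) m).map
            (fun j => PySem.List.pyGetD s j 0)).sum := by
  have hm0 : 0 < m := by omega
  have hstop_le : PySem.Int.floordiv (s.length : Int) m * m ≤ (s.length : Int) :=
    (PySem.Int.le_floordiv_iff_mul_le hm0).1 le_rfl
  intro fuel
  induction fuel with
  | zero =>
      intro i answer hi hdvd hfuel
      have hnil : PySem.List.pyRange (i + m - 1) (PySem.Int.floordiv (s.length : Int) m * m) m = [] :=
        pyRange_pos_eq_nil _ _ hm0 (by omega)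
      simp [solutionLoop, hnil]
  | succ fuel ih =>
      intro i answer hi hdvd hfuel
      obtain ⟨c, hc⟩ := hdvd
      by_cases h : i + m ≤ (s.length : Int)
      · -- full box: its min is s[i+m-1]
        have hstop_ge : i + m ≤ PySem.Int.floordiv (s.length : Int) m * m := by
          have h1 : (c + 1) * m ≤ (s.length : Int) := by nlinarith [hc]
          have h2 : c + 1 ≤ PySem.Int.floordiv (s.length : Int) m :=
            (PySem.Int.le_floordiv_iff_mul_le hm0).2 h1
          nlinarith [hc]
        have hbox : PySem.List.slice s (some i) (some (i + m))
            = (s.drop i.toNat).take ((i + m).toNat - i.toNat) :=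
          PySem.List.slice_toNat s hi (by omega)
        have hlen : (PySem.List.slice s (some i) (some (i + m))).length = m.toNat := by
          rw [hbox]
          simp [List.length_take, List.length_drop]
          omega
        have hboxne : PySem.List.slice s (some i) (some (i + m)) ≠ [] := by
          intro hnil; rw [hnil] at hlen; simp at hlen; omega
        have hboxpw : (PySem.List.slice s (some i) (some (i + m))).Pairwise (fun a b => b ≤ a) := by
          rw [hbox]
          exact (hs.sublist (List.drop_sublist _ _)).sublist (List.take_sublist _ _)
        have hminval : (PySem.List.min? (PySem.List.slice s (some i) (some (i + m))) (fun x => x)).getD 0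
            = PySem.List.pyGetD s (i + m - 1) 0 := by
          rw [min_desc_getLast _ hboxne hboxpw, List.getLast_eq_getElem]
          rw [PySem.List.pyGetD_eq_getElem s 0 (by omega) (by omega)]
          rw [List.getElem_of_eq hbox, List.getElem_take, List.getElem_drop]
          congr 1
          rw [hlen]
          omega
        have hstep : solutionLoop s m i answer (fuel + 1)
            = solutionLoop s m (i + m)
                (answer + ((PySem.List.min? (PySem.List.slice s (some i) (some (i + m))) (fun x => x)).getD 0)
                  * ((PySem.List.slice s (some i) (some (i + m))).length : Int)) fuel := by
          rw [solutionLoop]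
          simp only [if_pos h]
        rw [hstep, ih (i + m) _ (by omega) ⟨c + 1, by rw [hc]; ring⟩ (by omega)]
        rw [pyRange_pos_cons (i + m - 1) _ hm0 (by omega), List.map_cons, List.sum_cons]
        rw [hminval, hlen, Int.toNat_of_nonneg (by omega : (0:Int) ≤ m)]
        rw [show i + m - 1 + m = i + m + m - 1 by ring]
        ring
      · -- no full box left: the remaining range is empty
        have hstop_le_i : PySem.Int.floordiv (s.length : Int) m * m ≤ i := by
          have h1 : PySem.Int.floordiv (s.length : Int) m ≤ c := by
            by_contra hcon
            push_neg at hcon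
            have h2 := (PySem.Int.le_floordiv_iff_mul_le hm0).1 (by omega : c + 1 ≤ PySem.Int.floordiv (s.length : Int) m)
            nlinarith [hc]
          nlinarith [hc]
        have hnil : PySem.List.pyRange (i + m - 1) (PySem.Int.floordiv (s.length : Int) m * m) m = [] :=
          pyRange_pos_eq_nil _ _ hm0 (by omega)
        rw [solutionLoop]
        simp only [if_neg h, hnil]
        simp

-- ===== B-side helpers (proof-only) =====

-- the descending-sorted list as a concatenation of constant runs, one per distinct value
def flatRuns (score : List Int) (K : List Int) : List Int :=
  K.flatMap (fun v => List.replicate (List.count v score) v)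

-- two integers congruent mod m and less than m apart are ordered
lemma emod_aligned_ge {m b b' : Int} (hm : 0 < m) (hmod : b % m = b' % m) (h : b - m < b') :
    b ≤ b' := by
  have hdvd : m ∣ (b' - b) := by
    apply Int.dvd_of_emod_eq_zero
    rw [Int.sub_emod, hmod]
    simp
  obtain ⟨t, ht⟩ := hdvd
  have ht0 : 0 ≤ t := by nlinarith
  nlinarith

-- x lies in [ (x/m)*m, (x/m)*m + m )
lemma ediv_bounds {m : Int} (hm : 0 < m) (x : Int) :
    (x / m) * m ≤ x ∧ x < (x / m) * m + m := by
  have h1 := Int.emod_nonneg x (by omega : m ≠ 0)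
  have h2 := Int.emod_lt_of_pos x hm
  have h3 := Int.ediv_add_emod x m
  constructor <;> nlinarith

-- the first box-minimum position ≥ pos, in closed form
lemma bstart_eq {m : Int} (hm : 0 < m) (pos : Int) :
    pos + (m - 1 - pos) % m = (pos / m) * m + (m - 1) := by
  have hr1 : 0 ≤ (m - 1 - pos) % m := Int.emod_nonneg _ (by omega)
  have hr2 : (m - 1 - pos) % m < m := Int.emod_lt_of_pos _ hm
  have hb := ediv_bounds hm pos
  have hmodL : (pos + (m - 1 - pos) % m) % m = (m - 1) % m := by
    conv_lhs => rw [Int.add_emod, Int.emod_emod_of_dvd _ dvd_rfl, ← Int.add_emod]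
    norm_num
  have hmodR : ((pos / m) * m + (m - 1)) % m = (m - 1) % m := by
    rw [show (pos / m) * m + (m - 1) = (m - 1) + m * (pos / m) by ring,
        Int.add_mul_emod_self_left]
  apply le_antisymm
  · exact emod_aligned_ge hm (hmodL.trans hmodR.symm) (by omega)
  · exact emod_aligned_ge hm (hmodR.trans hmodL.symm) (by omega)

-- splitting range(a, b, m) at a point mid = a + c*m of the progression
lemma pyRange_split {m : Int} (hm : 0 < m) :
    ∀ (c : Nat) (a b mid : Int), mid = a + (c : Int) * m →
      PySem.List.pyRange a b m
        = PySem.List.pyRange a (min mid b) m ++ PySem.List.pyRange mid b m := by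
  intro c
  induction c with
  | zero =>
      intro a b mid hmid
      have : mid = a := by omega
      subst this
      by_cases hba : b ≤ mid
      · rw [pyRange_pos_eq_nil mid b hm hba,
            pyRange_pos_eq_nil mid (min mid b) hm (by omega)]
        simp
      · rw [show min mid b = mid by omega, pyRange_pos_eq_nil mid mid hm le_rfl]
        simp
  | succ c ih =>
      intro a b mid hmid
      have ham : a + m ≤ mid := by
        have : (0 : Int) ≤ (c : Int) * m := by positivity
        push_cast at hmid; nlinarith
      by_cases hba : b ≤ a
      · rw [pyRange_pos_eq_nil a b hm hba,
            pyRange_pos_eq_nil a (min mid b) hm (by omega),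
            pyRange_pos_eq_nil mid b hm (by omega)]
        simp
      · have hab : a < b := by omega
        rw [pyRange_pos_cons a b hm hab,
            pyRange_pos_cons a (min mid b) hm (by omega),
            ih (a + m) b mid (by push_cast at hmid ⊢; linarith)]
        simp

-- the length of range(a, b, m) for positive m, as an integer
lemma length_pyRange_pos {m : Int} (hm : 0 < m) (a b : Int) :
    ((PySem.List.pyRange a b m).length : Int) = max ((b - a + m - 1) / m) 0 := by
  rw [PySem.List.pyRange_of_pos a b hm]
  by_cases h : a < b
  · simp only [List.length_map, List.length_range, if_pos h]
    rw [Int.toNat_eq_max]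
  · have hle : (b - a + m - 1) / m ≤ 0 := by
      have := (Int.ediv_lt_iff_lt_mul hm (a := b - a + m - 1) (b := 1)).2 (by omega)
      omega
    simp only [List.length_map, List.length_range, if_neg h]
    omega

-- element count of the run decomposition
lemma count_flatRuns (score : List Int) :
    ∀ (K : List Int), K.Nodup →
      ∀ x, (flatRuns score K).count x = if x ∈ K then List.count x score else 0 := by
  intro K
  induction K with
  | nil => intro _ x; simp [flatRuns]
  | cons v K' ih =>
      intro hnd x
      have hnd' : K'.Nodup := hnd.of_cons
      have hv : v ∉ K' := (List.nodup_cons.1 hnd).1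
      have hflat : flatRuns score (v :: K')
          = List.replicate (List.count v score) v ++ flatRuns score K' := by
        simp [flatRuns]
      rw [hflat, List.count_append, List.count_replicate, ih hnd' x]
      by_cases hxv : x = v
      · subst hxv
        simp [hv]
      · simp [hxv, Ne.symm hxv]

-- the run decomposition of a descending list of values is descending
lemma pairwise_flatRuns (score : List Int) :
    ∀ (K : List Int), K.Pairwise (fun a b => b ≤ a) →
      (flatRuns score K).Pairwise (fun a b => b ≤ a) := by
  intro K
  induction K with
  | nil => intro _; simp [flatRuns]
  | cons v K' ih =>
      intro hp
      have hflat : flatRuns score (v :: K')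
          = List.replicate (List.count v score) v ++ flatRuns score K' := by
        simp [flatRuns]
      rw [hflat, List.pairwise_append]
      refine ⟨List.pairwise_replicate.2 (by simp), ih (List.pairwise_cons.1 hp).2, ?_⟩
      intro a ha b hb
      have hav : a = v := (List.eq_of_mem_replicate ha)
      unfold flatRuns at hb
      obtain ⟨w, hw, hbw⟩ := List.mem_flatMap.1 hb
      have hbw' : b = w := List.eq_of_mem_replicate hbw
      rw [hav, hbw']
      exact (List.pairwise_cons.1 hp).1 w hw

-- sorted(score, reverse=True) IS the concatenation of constant runs over the
-- descending-sorted distinct values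
lemma sorted_eq_flatRuns (score : List Int) :
    PySem.List.sorted score (fun x => x) true
      = flatRuns score (PySem.List.sorted (PySem.Set.ofList score) (fun x => x) true) := by
  set K := PySem.List.sorted (PySem.Set.ofList score) (fun x => x) true with hK
  have hKperm : K.Perm (PySem.Set.ofList score) := PySem.List.sorted_perm _ _ _
  have hKnodup : K.Nodup := hKperm.symm.nodup (PySem.Set.nodup_ofList score)
  have hmemK : ∀ x, x ∈ K ↔ x ∈ score := fun x =>
    (PySem.List.mem_sorted _ _ _ x).trans (PySem.Set.mem_ofList score x)
  have hperm : (flatRuns score K).Perm score := by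
    rw [List.perm_iff_count]
    intro x
    rw [count_flatRuns score K hKnodup x]
    by_cases hx : x ∈ K
    · simp [hx]
    · have hxs : x ∉ score := fun hc => hx ((hmemK x).2 hc)
      simp [hx, List.count_eq_zero.2 hxs]
  refine PySem.List.eq_of_perm_of_pairwise_le_of_injective (fun x : Int => -x)
    neg_injective ((PySem.List.sorted_perm score _ true).trans hperm.symm) ?_ ?_
  · exact (PySem.List.sorted_pairwise_rev score _).imp (fun h => neg_le_neg h)
  · exact (pairwise_flatRuns score K
      (PySem.List.sorted_pairwise_rev (PySem.Set.ofList score) _)).imp (fun h => neg_le_neg h)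

-- the B-side fold invariant: from cumulative position pos, the run walk adds exactly the sum of
-- the boundary elements of the descending-sorted list at positions ≥ pos
lemma bfold_eq (score : List Int) (m : Int) (hm : 1 ≤ m) :
    ∀ (K : List Int) (pos a0 : Int), 0 ≤ pos → pos ≤ (score.length : Int) →
      (PySem.List.sorted score (fun x => x) true).drop pos.toNat = flatRuns score K →
      (K.foldl (fun (p : Int × Int) v =>
          (p.1 + v * ((min (p.2 + (List.count v score : Int)) ((score.length : Int) / m * m)) / m
                      - p.2 / m), p.2 + (List.count v score : Int)))
        (a0, pos)).1
      = a0 + ((PySem.List.pyRange (pos + (m - 1 - pos) % m) ((score.length : Int) / m * m) m).map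
          (fun j => PySem.List.pyGetD (PySem.List.sorted score (fun x => x) true) j 0)).sum := by
  have hm0 : 0 < m := by omega
  have hslen : (PySem.List.sorted score (fun x => x) true).length = score.length :=
    PySem.List.length_sorted score _ true
  set s := PySem.List.sorted score (fun x => x) true with hs
  set n : Int := (score.length : Int) with hn
  set Q : Int := n / m with hQ
  have hQb := ediv_bounds hm0 n
  rw [← hQ] at hQb
  intro K
  induction K with
  | nil =>
      intro pos a0 hpos hposn hdrop
      have hdnil : s.drop pos.toNat = [] := by rw [hdrop]; simp [flatRuns]
      have : s.length ≤ pos.toNat := by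
        by_contra hc
        push_neg at hc
        have := List.drop_eq_nil_iff.1 hdnil
        omega
      have hposeq : pos = n := by rw [hn]; omega
      have hnil : PySem.List.pyRange (pos + (m - 1 - pos) % m) (Q * m) m = [] := by
        apply pyRange_pos_eq_nil _ _ hm0
        have h1 : 0 ≤ (m - 1 - pos) % m := Int.emod_nonneg _ (by omega)
        omega
      simp [hnil]
  | cons v K' ih =>
      intro pos a0 hpos hposn hdrop
      set cN : Nat := List.count v score with hcN
      set c : Int := (cN : Int) with hc
      have hc0 : 0 ≤ c := by positivity
      have hflat : flatRuns score (v :: K')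
          = List.replicate cN v ++ flatRuns score K' := by simp [flatRuns, ← hcN]
      rw [hflat] at hdrop
      -- pos + c ≤ n
      have hlen : s.length - pos.toNat = cN + (flatRuns score K').length := by
        have := congrArg List.length hdrop
        simpa using this
      have hposn' : pos + c ≤ n := by
        have : cN ≤ s.length - pos.toNat := by omega
        rw [hn]
        omega
      -- the tail hypothesis for the IH
      have hdrop' : s.drop (pos + c).toNat = flatRuns score K' := by
        have hnat : (pos + c).toNat = pos.toNat + cN := by omega
        rw [hnat, ← List.drop_drop, hdrop]
        simp
      -- every position in [pos, pos+c) of s holds v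
      have getv : ∀ j : Int, pos ≤ j → j < pos + c → PySem.List.pyGetD s j 0 = v := by
        intro j h1 h2
        have hjn : j < n := by omega
        have hjlen : j < (s.length : Int) := by rw [hslen, ← hn]; omega
        rw [PySem.List.pyGetD_eq_getElem s 0 (by omega) hjlen]
        calc s[j.toNat] = (s.drop pos.toNat)[j.toNat - pos.toNat]'(by
                rw [List.length_drop, hslen]; omega) := by
              rw [List.getElem_drop]; congr 1; omega
          _ = v := by
              rw [List.getElem_of_eq hdrop _]
              rw [List.getElem_append_left (by simp; omega)]
              simp
      -- arithmetic bookkeeping for the run's boundary count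
      set q : Int := pos / m with hq
      set q' : Int := (pos + c) / m with hq'
      have hqb := ediv_bounds hm0 pos
      rw [← hq] at hqb
      have hq'b := ediv_bounds hm0 (pos + c)
      rw [← hq'] at hq'b
      have hba : pos + (m - 1 - pos) % m = q * m + (m - 1) := bstart_eq hm0 pos
      have hba' : (pos + c) + (m - 1 - (pos + c)) % m = q' * m + (m - 1) := bstart_eq hm0 (pos + c)
      have hqq' : q ≤ q' := Int.ediv_le_ediv hm0 (by omega)
      have hqQ : q ≤ Q := Int.ediv_le_ediv hm0 hposn
      have hQm : (Q * m) / m = Q := Int.mul_ediv_cancel Q (by omega)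
      -- the value of Δ computed by the fold step
      have hdelta : (min (pos + c) (Q * m)) / m - q = min q' Q - q := by
        by_cases hle : pos + c ≤ Q * m
        · have hq'leQ : q' ≤ Q := by
            rw [hq', ← hQm]; exact Int.ediv_le_ediv hm0 hle
          rw [min_eq_left hle, min_eq_left hq'leQ]
        · have hlt : Q * m < pos + c := by omega
          have hQleq' : Q ≤ q' := by
            rw [hq', ← hQm]; exact Int.ediv_le_ediv hm0 (le_of_lt hlt)
          rw [min_eq_right (le_of_lt hlt), hQm, min_eq_right hQleq']
      -- split the boundary range at the first boundary ≥ pos + c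
      obtain ⟨c', hc'⟩ : ∃ c' : Nat, q' * m + (m - 1) = (q * m + (m - 1)) + (c' : Int) * m := by
        refine ⟨(q' - q).toNat, ?_⟩
        rw [Int.toNat_of_nonneg (by omega)]; ring
      have hsplit := pyRange_split hm0 c' (q * m + (m - 1)) (Q * m) (q' * m + (m - 1)) hc'
      -- the first chunk is constantly v
      have hchunkv : (PySem.List.pyRange (q * m + (m - 1)) (min (q' * m + (m - 1)) (Q * m)) m).map
            (fun j => PySem.List.pyGetD s j 0)
          = (PySem.List.pyRange (q * m + (m - 1)) (min (q' * m + (m - 1)) (Q * m)) m).map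
            (fun _ => v) := by
        apply List.map_congr_left
        intro j hj
        obtain ⟨hj1, hj2, hj3⟩ := (PySem.List.mem_pyRange_iff_of_pos hm0 j).1 hj
        obtain ⟨t, ht⟩ := hj3
        have hjmod : (q' * m + (m - 1)) % m = j % m := by
          apply Int.emod_eq_emod_iff_emod_sub_eq_zero.2
          apply Int.emod_eq_zero_of_dvd
          exact ⟨q' - q - t, by linear_combination -ht⟩
        have hjlt : j < pos + c := by
          by_contra hge
          push_neg at hge
          have : q' * m + (m - 1) ≤ j :=
            emod_aligned_ge hm0 hjmod (by omega)
          omega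
        exact getv j (by omega) hjlt
      -- and its length is min q' Q - q
      have hchunklen : ((PySem.List.pyRange (q * m + (m - 1)) (min (q' * m + (m - 1)) (Q * m)) m).length : Int)
          = min q' Q - q := by
        rw [length_pyRange_pos hm0]
        have hqmin : q ≤ min q' Q := le_min hqq' hqQ
        by_cases hle : q' * m + (m - 1) ≤ Q * m
        · have hq'leQ : q' ≤ Q := by nlinarith
          rw [min_eq_left hle, min_eq_left hq'leQ,
              show q' * m + (m - 1) - (q * m + (m - 1)) + m - 1 = (m - 1) + (q' - q) * m by ring,
              Int.add_mul_ediv_right _ _ (by omega : m ≠ 0),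
              Int.ediv_eq_zero_of_lt (by omega) (by omega)]
          omega
        · have hlt : Q * m < q' * m + (m - 1) := by omega
          have hQleq' : Q ≤ q' := by nlinarith
          rw [min_eq_right (le_of_lt hlt), min_eq_right hQleq',
              show Q * m - (q * m + (m - 1)) + m - 1 = (Q - q) * m by ring,
              Int.mul_ediv_cancel _ (by omega : m ≠ 0)]
          omega
      -- put the step together with the IH
      rw [List.foldl_cons]
      rw [ih (pos + c) _ (by omega) hposn' hdrop']
      rw [hba, hba', hsplit, List.map_append, List.sum_append, hchunkv]
      rw [PySem.List.sum_map_const_int, hchunklen]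
      rw [show (min (pos + c) (Q * m)) / m = min q' Q - q + q by omega]
      ring

-- ===== VERDICT (by name: the statement is the Claim_ definition above) =====
theorem solution_spec : Claim_equal_solution := by
  intro k m score _ hm
  have hm0 : 0 < m := by exact hm
  unfold Spec_solution solution solution_alt
  dsimp only
  -- A's side: the loop sums the boundary minima of the descending-sorted list
  have hpw := PySem.List.sorted_pairwise_rev score (fun x => x)
  rw [solutionLoop_eq (PySem.List.sorted score (fun x => x) true) m hm hpw
        _ 0 0 le_rfl ⟨0, by ring⟩ (by push_cast; omega)]
  -- B's side: the counter is Counter(score); its keys are the distinct values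
  rw [PySem.Dict.foldl_insert_getD_add_one_eq_counter score]
  simp only [PySem.Dict.getD_counter, PySem.Dict.keys_counter, PySem.List.len_eq,
    PySem.Int.floordiv_eq_ediv_of_pos hm0]
  rw [bfold_eq score m hm (PySem.List.sorted (PySem.Set.ofList score) (fun x => x) true)
        0 0 le_rfl (by positivity) (by simpa using (sorted_eq_flatRuns score))]
  simp only [PySem.List.length_sorted]
  have hstart : (0 : Int) + (m - 1 - 0) % m = 0 + m - 1 := by
    rw [Int.emod_eq_of_lt (by omega) (by omega)]; ring
  rw [hstart]
  ring
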